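-- pv_equiv track=rewrite | github.com/4ndymcfly/linux-mole | lm.py | summary_totals
-- ===== SOURCE A (Python) =====
-- from typing import Dict, List, Optional, Tuple, Any
--
-- def summary_totals(items: List[Dict]) -> Tuple[int, bool, int, int]:
--     total_bytes = 0
--     unknown = False
--     total_items = 0
--     categories = len(items)
--     for it in items:
--         count = it["count"]
--         if count > 0:
--             total_items += count
--         if it.get("unknown"):
--             unknown = True
--         if it["bytes"] is None:
--             if count > 0:
--                 unknown = True
--         else:
--             total_bytes += it["bytes"]
--     return total_bytes, unknown, total_items, categories
-- ===== SOURCE B (Python) =====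
-- def summary_totals(items):
--     # Divide-and-conquer: each item yields a (bytes, unknown, items) triple,
--     # triples are merged by a monoidal combine over recursive halves.
--     def contrib(it):
--         count = it["count"]
--         b = it["bytes"]
--         return (b if b is not None else 0,
--                 bool(it.get("unknown")) or (b is None and count > 0),
--                 count if count > 0 else 0)
--
--     def dc(lo, hi):
--         if hi - lo == 0:
--             return (0, False, 0)
--         if hi - lo == 1:
--             return contrib(items[lo])
--         mid = (lo + hi) // 2
--         a = dc(lo, mid)
--         b = dc(mid, hi)
--         return (a[0] + b[0], a[1] or b[1], a[2] + b[2])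
--
--     total_bytes, unknown, total_items = dc(0, len(items))
--     return total_bytes, unknown, total_items, len(items)
-- ===== Notes on version B (the rewrite author's own statement) =====
-- stated objective: alternative
-- what changed: A's single sequential loop over three mutable accumulators is replaced by a divide-and-conquer reduction: each item is mapped to a (bytes, unknown, count) triple and halves are merged with a monoidal combine (+, or, +), correct because all three components are commutative-monoid reductions.
import Mathlib
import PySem

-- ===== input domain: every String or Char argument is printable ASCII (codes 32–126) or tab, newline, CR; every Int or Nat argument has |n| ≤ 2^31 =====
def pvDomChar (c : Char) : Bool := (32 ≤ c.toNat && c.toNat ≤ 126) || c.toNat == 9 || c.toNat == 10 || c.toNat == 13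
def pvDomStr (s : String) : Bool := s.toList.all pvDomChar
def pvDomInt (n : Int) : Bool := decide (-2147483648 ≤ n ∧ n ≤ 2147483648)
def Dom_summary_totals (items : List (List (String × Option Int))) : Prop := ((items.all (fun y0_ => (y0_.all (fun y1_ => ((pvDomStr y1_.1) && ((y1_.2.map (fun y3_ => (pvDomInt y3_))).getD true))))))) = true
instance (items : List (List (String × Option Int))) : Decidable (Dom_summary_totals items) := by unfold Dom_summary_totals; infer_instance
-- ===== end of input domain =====

-- B replaces A's sequential three-accumulator loop by a divide-and-conquer reduction
-- (per-item triples merged with a monoidal combine over recursive halves); objective: alternative.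

-- ===== PORT A =====
-- truthiness of it.get("unknown"): a missing key, None or 0 is falsy, any other int truthy
def pvTruthy (o : Option (Option Int)) : Bool :=
  match o with
  | some (some v) => v != 0
  | _ => false

-- loop body of A (state = (total_bytes, unknown, total_items))
def pvStepA (st : Int × Bool × Int) (it : List (String × Option Int)) : Int × Bool × Int :=
  let count : Int := ((PySem.Dict.get? (PySem.Dict.mk it) "count").getD none).getD 0
  let ti := if count > 0 then st.2.2 + count else st.2.2
  let u1 := if pvTruthy (PySem.Dict.get? (PySem.Dict.mk it) "unknown") then true else st.2.1
  match (PySem.Dict.get? (PySem.Dict.mk it) "bytes").getD none with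
  | none => (st.1, if count > 0 then true else u1, ti)
  | some b => (st.1 + b, u1, ti)

def summary_totals (items : List (List (String × Option Int))) : Int × Bool × Int × Int :=
  let s := items.foldl pvStepA (0, false, 0)
  (s.1, s.2.1, s.2.2, (items.length : Int))

-- ===== PORT B =====
def pvCount (it : List (String × Option Int)) : Int :=
  ((PySem.Dict.get? (PySem.Dict.mk it) "count").getD none).getD 0

def pvBytes (it : List (String × Option Int)) : Option Int :=
  (PySem.Dict.get? (PySem.Dict.mk it) "bytes").getD none

-- contrib(it) of Source B
def pvContrib (it : List (String × Option Int)) : Int × Bool × Int :=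
  let count := pvCount it
  let b := pvBytes it
  (b.getD 0,
   pvTruthy (PySem.Dict.get? (PySem.Dict.mk it) "unknown") || (b == none && decide (count > 0)),
   if count > 0 then count else 0)

-- dc(lo, hi) of Source B: Python recurses on index halves of `items`; here the same
-- halves are the take/drop of the sublist at the midpoint. The extra Nat argument
-- is fuel making the recursion structural (each half is strictly shorter, so
-- fuel = length never runs out; the fuel-0 branch is unreachable).
def pvDCAux (fuel : Nat) (xs : List (List (String × Option Int))) : Int × Bool × Int :=
  match fuel, xs with
  | _, [] => (0, false, 0)
  | _, [it] => pvContrib it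
  | 0, _ :: _ :: _ => (0, false, 0)
  | f + 1, x :: y :: rest =>
      let zs := x :: y :: rest
      let a := pvDCAux f (zs.take (zs.length / 2))
      let b := pvDCAux f (zs.drop (zs.length / 2))
      (a.1 + b.1, a.2.1 || b.2.1, a.2.2 + b.2.2)

def pvDC (xs : List (List (String × Option Int))) : Int × Bool × Int :=
  pvDCAux xs.length xs

def summary_totals_alt (items : List (List (String × Option Int))) : Int × Bool × Int × Int :=
  let s := pvDC items
  (s.1, s.2.1, s.2.2, (items.length : Int))

-- ===== PRECONDITION & SPEC =====
-- Pre_ excludes exactly the inputs on which A raises: an item without a "count" or "bytes"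
-- key (KeyError) or with count = None ('None > 0' is a TypeError).
def Pre_summary_totals (items : List (List (String × Option Int))) : Prop :=
  ∀ it ∈ items, (((PySem.Dict.get? (PySem.Dict.mk it) "count").getD none).isSome ∧ (PySem.Dict.get? (PySem.Dict.mk it) "bytes").isSome)
instance (items : List (List (String × Option Int))) : Decidable (Pre_summary_totals items) := by unfold Pre_summary_totals; infer_instance

def pvWitness_summary_totals : (List (List (String × Option Int))) :=
  [[("count", some 2), ("bytes", none)], [("count", some 1), ("bytes", some 5), ("unknown", some 1)]]

def Spec_summary_totals (items : List (List (String × Option Int))) (out : Int × Bool × Int × Int) : Prop := out = summary_totals_alt items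
instance (items : List (List (String × Option Int))) (out : Int × Bool × Int × Int) : Decidable (Spec_summary_totals items out) := by unfold Spec_summary_totals; infer_instance

-- ===== CLAIM (what is proved, stated in full; the proofs are below) =====
def Claim_equal_summary_totals : Prop := ∀ (items : List (List (String × Option Int))), Dom_summary_totals items → Pre_summary_totals items → Spec_summary_totals items (summary_totals items)

-- ===== LEMMAS AND PROOFS =====
-- the common characterization of both programs' (bytes, unknown, items) triple
def pvF (items : List (List (String × Option Int))) : Int × Bool × Int :=
  (((items.filter (fun it => decide (pvBytes it ≠ none))).map (fun it => (pvBytes it).getD 0)).sum,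
   items.any (fun it => pvTruthy (PySem.Dict.get? (PySem.Dict.mk it) "unknown") || (pvBytes it == none && decide (pvCount it > 0))),
   ((items.filter (fun it => decide (pvCount it > 0))).map pvCount).sum)

lemma pvF_append (a b : List (List (String × Option Int))) :
    pvF (a ++ b) = ((pvF a).1 + (pvF b).1, (pvF a).2.1 || (pvF b).2.1, (pvF a).2.2 + (pvF b).2.2) := by
  simp [pvF]

lemma pvF_single (it : List (String × Option Int)) : pvF [it] = pvContrib it := by
  unfold pvF pvContrib
  by_cases hb : pvBytes it = none <;> by_cases hc : pvCount it > 0 <;> simp [hb, hc]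

lemma pvDCAux_eq_pvF (fuel : Nat) (xs : List (List (String × Option Int))) (h : xs.length ≤ fuel) :
    pvDCAux fuel xs = pvF xs := by
  induction fuel generalizing xs with
  | zero =>
    match xs with
    | [] => simp [pvDCAux, pvF]
    | [it] => rw [pvDCAux, pvF_single]
    | x :: y :: rest => simp at h
  | succ f ih =>
    match xs with
    | [] => simp [pvDCAux, pvF]
    | [it] => rw [pvDCAux, pvF_single]
    | x :: y :: rest =>
      rw [pvDCAux]
      have ht : ((x :: y :: rest).take ((x :: y :: rest).length / 2)).length ≤ f := by
        simp only [List.length_take, List.length_cons] at *; omega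
      have hd : ((x :: y :: rest).drop ((x :: y :: rest).length / 2)).length ≤ f := by
        simp only [List.length_drop, List.length_cons] at *; omega
      rw [ih _ ht, ih _ hd, ← pvF_append, List.take_append_drop]

lemma pvDC_eq_pvF (xs : List (List (String × Option Int))) : pvDC xs = pvF xs :=
  pvDCAux_eq_pvF xs.length xs le_rfl

lemma pv_fold_char (items : List (List (String × Option Int))) :
    ∀ tb u ti, items.foldl pvStepA (tb, u, ti) =
      (tb + (pvF items).1, u || (pvF items).2.1, ti + (pvF items).2.2) := by
  induction items with
  | nil => intro tb u ti; simp [pvF]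
  | cons it rest ih =>
    intro tb u ti
    simp only [List.foldl_cons]
    rw [show pvStepA (tb, u, ti) it =
        (tb + (if pvBytes it ≠ none then (pvBytes it).getD 0 else 0),
         u || (pvTruthy (PySem.Dict.get? (PySem.Dict.mk it) "unknown") || (pvBytes it == none && decide (pvCount it > 0))),
         ti + (if pvCount it > 0 then pvCount it else 0)) from ?_]
    · rw [ih]
      unfold pvF
      by_cases hb : pvBytes it = none <;> by_cases hc : pvCount it > 0 <;>
        simp [hb, hc, add_assoc, Bool.or_assoc]
    · unfold pvStepA
      cases h : (PySem.Dict.get? (PySem.Dict.mk it) "bytes").getD none with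
      | none =>
        have hb : pvBytes it = none := h
        by_cases hc : pvCount it > 0 <;>
          cases u <;>
            cases htr : pvTruthy (PySem.Dict.get? (PySem.Dict.mk it) "unknown") <;>
              (simp_all [pvBytes, pvCount] <;> split_ifs <;> simp_all)
      | some b =>
        have hb : pvBytes it = some b := h
        by_cases hc : pvCount it > 0 <;>
          cases u <;>
            cases htr : pvTruthy (PySem.Dict.get? (PySem.Dict.mk it) "unknown") <;>
              (simp_all [pvBytes, pvCount] <;> split_ifs <;> simp_all)

-- ===== VERDICT (by name: the statement is the Claim_ definition above) =====
theorem summary_totals_spec : Claim_equal_summary_totals := by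
  intro items _ _
  unfold Spec_summary_totals summary_totals summary_totals_alt
  rw [pv_fold_char, pvDC_eq_pvF]
  simp
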